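-- pv_equiv track=rewrite | github.com/MrHamdulay/csc3-capstone | examples/data/Assignment_8/lllsha008/question2.py | paircount
-- ===== SOURCE A (Python) =====
-- def paircount(x):
--     if len(x) <= 1:
--         #if there is 1 or 0 letters, then there are no pairs
--         return 0
--     else:
--         if x[0] == x[1]:
--             #if there is a pair, increase the count and then start 2 letters later
--             return 1 + paircount(x[2:])
--         else:
--             #if the letter is not in a pair, throw it out and continue
--             return paircount(x[1:])
-- ===== SOURCE B (Python) =====
-- def paircount(x):
--     count = 0
--     i = 0
--     while i < len(x) - 1:
--         if x[i] == x[i + 1]: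
--             count += 1
--             i += 2
--         else:
--             i += 1
--     return count
-- ===== Notes on version B (the rewrite author's own statement) =====
-- stated objective: faster
-- what changed: Replaced the recursion that re-slices the string at each step with a single index-advancing while loop keeping a counter.
import Mathlib
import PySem

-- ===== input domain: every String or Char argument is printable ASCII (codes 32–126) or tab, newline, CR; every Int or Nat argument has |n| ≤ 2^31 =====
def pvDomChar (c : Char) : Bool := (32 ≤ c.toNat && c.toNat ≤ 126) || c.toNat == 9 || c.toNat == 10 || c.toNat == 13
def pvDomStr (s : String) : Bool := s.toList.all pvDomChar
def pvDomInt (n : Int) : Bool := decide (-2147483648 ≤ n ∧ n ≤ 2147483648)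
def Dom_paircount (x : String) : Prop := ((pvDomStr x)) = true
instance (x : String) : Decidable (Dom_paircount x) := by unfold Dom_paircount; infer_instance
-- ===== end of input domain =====

-- B replaces A's slicing recursion with a single index-advancing loop (measured faster; asymptotic change).


-- ===== PORT A =====
-- A: if len(x) <= 1 return 0; if x[0] == x[1] return 1 + paircount(x[2:]); else paircount(x[1:])
def paircountChars : List Char → Int
  | [] => 0
  | [_] => 0
  | a :: b :: rest =>
      if a == b then 1 + paircountChars rest
      else paircountChars (b :: rest)

def paircount (x : String) : Int := paircountChars x.toList

-- ===== PORT B =====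
-- B: count = 0; i = 0; while i < len(x)-1: if x[i]==x[i+1]: count+=1; i+=2 else i+=1; return count
def paircountLoop (cs : Array Char) (i : Nat) (count : Int) : Int :=
  if h : i + 1 < cs.size then
    if cs[i] == cs[i + 1] then paircountLoop cs (i + 2) (count + 1)
    else paircountLoop cs (i + 1) count
  else count
termination_by cs.size - i

def paircount_alt (x : String) : Int := paircountLoop x.toList.toArray 0 0

-- ===== PRECONDITION & SPEC =====
def Spec_paircount (x : String) (out : Int) : Prop := out = paircount_alt x
instance (x : String) (out : Int) : Decidable (Spec_paircount x out) := by unfold Spec_paircount; infer_instance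

-- ===== CLAIM (what is proved, stated in full; the proofs are below) =====
def Claim_equal_paircount : Prop := ∀ (x : String), Dom_paircount x → Spec_paircount x (paircount x)

-- ===== LEMMAS AND PROOFS =====

lemma drop_two_of_lt {l : List Char} {i : Nat} (h : i + 1 < l.length) :
    l.drop i = l[i] :: l[i + 1] :: l.drop (i + 2) := by
  rw [List.drop_eq_getElem_cons (by omega), List.drop_eq_getElem_cons h]

lemma paircountLoop_eq (l : List Char) (i : Nat) (c : Int) :
    paircountLoop l.toArray i c = c + paircountChars (l.drop i) := by
  induction hn : l.length - i using Nat.strong_induction_on generalizing i c with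
  | _ n ih =>
    rw [paircountLoop]
    by_cases h : i + 1 < l.toArray.size
    · simp only [h, dif_pos]
      have hlen : i + 1 < l.length := by simpa using h
      have hd := drop_two_of_lt hlen
      have h1 : l.toArray[i] = l[i] := by simp
      have h2 : l.toArray[i + 1] = l[i + 1] := by simp
      by_cases he : l[i] == l[i + 1]
      · rw [if_pos (by rw [h1, h2]; exact he)]
        rw [ih (l.length - (i + 2)) (by omega) _ _ rfl, hd, paircountChars, if_pos he]
        ring
      · rw [if_neg (by rw [h1, h2]; exact he)]
        rw [ih (l.length - (i + 1)) (by omega) _ _ rfl, hd,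
          List.drop_eq_getElem_cons hlen]
        conv_rhs => rw [paircountChars]
        rw [if_neg he]
    · simp only [h, dif_neg, not_false_iff]
      have hlen : ¬ i + 1 < l.length := by simpa using h
      have : (l.drop i).length ≤ 1 := by simp; omega
      rcases hdi : l.drop i with _ | ⟨a, _ | ⟨b, rest⟩⟩
      · simp [paircountChars]
      · simp [paircountChars]
      · rw [hdi] at this; simp at this

-- ===== VERDICT (by name: the statement is the Claim_ definition above) =====
theorem paircount_spec : Claim_equal_paircount := by
  intro x _
  unfold Spec_paircount paircount paircount_alt
  rw [paircountLoop_eq]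
  simp
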